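-- pv_equiv track=rewrite | github.com/SauravSinha76/scaler | class66/join_rope.py | solve
-- ===== SOURCE A (Python) =====
-- import heapq
--
-- def solve( A):
--     sums = 0
--     heapq.heapify(A)
--     while len(A) > 1:
--         x = heapq.heappop(A)
--         y = heapq.heappop(A)
--         sums = sums + x + y
--         heapq.heappush(A, x + y)
--     return sums
-- ===== SOURCE B (Python) =====
-- def solve(A):
--     # Return-value equivalent to the heapq version; note: does not mutate A in place.
--     B = sorted(A)
--     total = 0
--     while len(B) > 1:
--         x, y = B[0], B[1]
--         s = x + y
--         total += s
--         rest = B[2:]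
--         i = 0
--         while i < len(rest) and rest[i] < s:
--             i += 1
--         rest.insert(i, s)
--         B = rest
--     return total
-- ===== Notes on version B (the rewrite author's own statement) =====
-- stated objective: alternative
-- what changed: Replaces the binary heap (heapq) with a single upfront sort plus ordered insertion of each merged rope into its sorted position, so the two smallest are always the first two list elements.
import Mathlib
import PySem

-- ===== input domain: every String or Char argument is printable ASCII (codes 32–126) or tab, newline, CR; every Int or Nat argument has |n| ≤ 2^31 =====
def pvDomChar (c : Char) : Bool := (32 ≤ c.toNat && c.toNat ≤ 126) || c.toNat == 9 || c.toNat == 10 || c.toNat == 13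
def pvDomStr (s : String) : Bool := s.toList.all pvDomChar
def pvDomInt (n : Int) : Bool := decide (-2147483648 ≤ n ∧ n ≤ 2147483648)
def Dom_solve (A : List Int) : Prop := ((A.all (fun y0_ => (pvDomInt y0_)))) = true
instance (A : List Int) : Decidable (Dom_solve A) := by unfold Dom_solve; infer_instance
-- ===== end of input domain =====

-- B replaces the heap with one upfront sort plus sorted insertion of each merged rope (alternative
-- data structure, not faster). A mutates its argument in place; the equivalence proved here is
-- about the RETURN value only.

-- ===== PORT A =====
-- heapq is a library call of A; it is ported by its value semantics on Int: heappop returns and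
-- removes the minimum value, heappush appends, heapify only rearranges (same multiset) — exact
-- for the returned sum, which depends only on the multiset of values. The while loop becomes
-- fuel recursion (each iteration shortens the list by one, so fuel = length suffices).
def solveLoop : Nat → List Int → Int → Int
  | 0, _, sums => sums
  | fuel+1, l, sums =>
    if l.length > 1 then
      match PySem.List.min? l (fun v => v) with
      | none => sums
      | some x =>
        let l1 := (PySem.List.remove? l x).getD []
        match PySem.List.min? l1 (fun v => v) with
        | none => sums
        | some y => solveLoop fuel (l1.erase y ++ [x + y]) (sums + x + y)
    else sums

def solve (A : List Int) : Int := solveLoop A.length A 0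

-- ===== PORT B =====
-- Source B's inner while/insert: put s after the strictly smaller prefix of the sorted list
def sortedInsert (s : Int) : List Int → List Int
  | [] => [s]
  | h :: t => if h < s then h :: sortedInsert s t else s :: h :: t

def altLoop : Nat → List Int → Int → Int
  | 0, _, total => total
  | fuel+1, l, total =>
    match l with
    | x :: y :: rest => altLoop fuel (sortedInsert (x + y) rest) (total + (x + y))
    | _ => total

def solve_alt (A : List Int) : Int :=
  altLoop A.length (PySem.List.sorted A (fun v => v) false) 0

-- ===== PRECONDITION & SPEC =====
def Spec_solve (A : List Int) (out : Int) : Prop := out = solve_alt A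
instance (A : List Int) (out : Int) : Decidable (Spec_solve A out) := by unfold Spec_solve; infer_instance

-- ===== CLAIM (what is proved, stated in full; the proofs are below) =====
def Claim_equal_solve : Prop := ∀ (A : List Int), Dom_solve A → Spec_solve A (solve A)

-- ===== LEMMAS AND PROOFS =====

lemma sortedInsert_perm (s : Int) (l : List Int) : (sortedInsert s l).Perm (s :: l) := by
  induction l with
  | nil => simp [sortedInsert]
  | cons h t ih =>
    simp only [sortedInsert]
    split
    · exact ((ih.cons h).trans (List.Perm.swap s h t)).symm.symm
    · exact List.Perm.refl _

lemma sortedInsert_pairwise (s : Int) (l : List Int) (hl : l.Pairwise (· ≤ ·)) :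
    (sortedInsert s l).Pairwise (· ≤ ·) := by
  induction l with
  | nil => simp [sortedInsert]
  | cons h t ih =>
    rcases List.pairwise_cons.mp hl with ⟨hh, ht⟩
    simp only [sortedInsert]
    split
    · rename_i hlt
      refine List.pairwise_cons.mpr ⟨?_, ih ht⟩
      intro x hx
      rcases List.mem_cons.mp ((sortedInsert_perm s t).mem_iff.mp hx) with rfl | hxt
      · exact le_of_lt hlt
      · exact hh x hxt
    · rename_i hnlt
      refine List.pairwise_cons.mpr ⟨?_, hl⟩
      intro x hx
      rcases List.mem_cons.mp hx with rfl | hxt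
      · exact le_of_not_gt hnlt
      · exact le_trans (le_of_not_gt hnlt) (hh x hxt)

-- the min value of a list that is a permutation of a sorted x :: t is x
lemma min?_of_perm_sorted (l t : List Int) (x : Int)
    (hp : (x :: t).Perm l) (hs : (x :: t).Pairwise (· ≤ ·)) :
    PySem.List.min? l (fun v => v) = some x := by
  have hxl : x ∈ l := hp.mem_iff.mp (List.mem_cons_self)
  have hlow : ∀ y ∈ l, x ≤ y := by
    intro y hy
    rcases List.mem_cons.mp (hp.mem_iff.mpr hy) with rfl | hyt
    · exact le_refl _
    · exact (List.pairwise_cons.mp hs).1 y hyt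
  rcases hm : PySem.List.min? l (fun v => v) with _ | m
  · rw [PySem.List.min?_eq_none_iff] at hm
    simp [hm] at hxl
  · have hml : m ∈ l := PySem.List.min?_mem hm
    have h1 : m ≤ x := PySem.List.min?_isMin hm x hxl
    have h2 : x ≤ m := hlow m hml
    rw [le_antisymm h1 h2]

lemma loop_eq (fuel : Nat) : ∀ (l₁ l₂ : List Int) (s : Int),
    l₂.Perm l₁ → l₂.Pairwise (· ≤ ·) → solveLoop fuel l₁ s = altLoop fuel l₂ s := by
  induction fuel with
  | zero => intro l₁ l₂ s _ _; rfl
  | succ f ih =>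
    intro l₁ l₂ s hp hs
    match l₂, hp, hs with
    | [], hp, _ =>
      have : l₁ = [] := hp.symm.eq_nil
      subst this
      simp [solveLoop, altLoop]
    | [a], hp, _ =>
      have hlen : l₁.length = 1 := by simpa using hp.length_eq.symm
      simp [solveLoop, altLoop, hlen]
    | x :: y :: rest, hp, hs =>
      have hlen : l₁.length > 1 := by
        have := hp.length_eq
        simp at this
        omega
      have hminx : PySem.List.min? l₁ (fun v => v) = some x :=
        min?_of_perm_sorted l₁ (y :: rest) x hp hs
      have hxl : x ∈ l₁ := hp.mem_iff.mp (List.mem_cons_self)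
      have hrem : PySem.List.remove? l₁ x = some (l₁.erase x) :=
        PySem.List.remove?_eq_some_erase l₁ x hxl
      have hp1 : (y :: rest).Perm (l₁.erase x) := by
        have := hp.erase x
        simpa using this
      have hs1 : (y :: rest).Pairwise (· ≤ ·) := (List.pairwise_cons.mp hs).2
      have hminy : PySem.List.min? (l₁.erase x) (fun v => v) = some y :=
        min?_of_perm_sorted (l₁.erase x) rest y hp1 hs1
      have hyl : y ∈ l₁.erase x := hp1.mem_iff.mp (List.mem_cons_self)
      have hp2 : rest.Perm ((l₁.erase x).erase y) := by
        have := hp1.erase y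
        simpa using this
      simp only [solveLoop, altLoop, hlen, if_pos, hminx, hrem, Option.getD_some, hminy]
      have hperm : (sortedInsert (x + y) rest).Perm ((l₁.erase x).erase y ++ [x + y]) := by
        refine (sortedInsert_perm (x + y) rest).trans ?_
        refine ((hp2.cons (x + y)).trans ?_)
        simpa using (List.perm_append_comm (l₁ := [x + y]) (l₂ := ((l₁.erase x).erase y)))
      have hsort : (sortedInsert (x + y) rest).Pairwise (· ≤ ·) :=
        sortedInsert_pairwise (x + y) rest (List.pairwise_cons.mp hs1).2
      rw [ih _ _ (s + x + y) hperm hsort]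
      ring_nf

-- ===== VERDICT (by name: the statement is the Claim_ definition above) =====
theorem solve_spec : Claim_equal_solve := by
  intro A _
  unfold Spec_solve solve solve_alt
  exact loop_eq A.length A _ 0 (PySem.List.sorted_perm A _ _) (PySem.List.sorted_pairwise A _)
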